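-- pv_equiv track=rewrite | github.com/Tomazinii/mrplatobackend | mrplatoweb/mrplatoweb/main.py | remove_forbidden_lines
-- ===== SOURCE A (Python) =====
-- def remove_forbidden_lines(forbidden_lines,proof_lines):
--     """ Remove forbidden  lines from proof_lines list """
--     allowed = []
--
--     i = 0
--     while i < len(proof_lines):
--         if i in forbidden_lines:
--             pass
--         else:
--             allowed.append(proof_lines[i])
--         i += 1
--     return allowed
-- ===== SOURCE B (Python) =====
-- def remove_forbidden_lines(forbidden_lines, proof_lines):
--     """ Remove forbidden lines from proof_lines list """
--     n = len(proof_lines)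
--     out = []
--     prev = 0
--     for c in sorted({i for i in forbidden_lines if 0 <= i < n}):
--         out += proof_lines[prev:c]
--         prev = c + 1
--     out += proof_lines[prev:]
--     return out
-- ===== Notes on version B (the rewrite author's own statement) =====
-- stated objective: faster
-- what changed: B no longer scans every index with an 'i in forbidden_lines' membership test: it sorts the set of valid forbidden indices once and concatenates the slices of proof_lines between consecutive forbidden cut points, plus the final tail slice.
import Mathlib
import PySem

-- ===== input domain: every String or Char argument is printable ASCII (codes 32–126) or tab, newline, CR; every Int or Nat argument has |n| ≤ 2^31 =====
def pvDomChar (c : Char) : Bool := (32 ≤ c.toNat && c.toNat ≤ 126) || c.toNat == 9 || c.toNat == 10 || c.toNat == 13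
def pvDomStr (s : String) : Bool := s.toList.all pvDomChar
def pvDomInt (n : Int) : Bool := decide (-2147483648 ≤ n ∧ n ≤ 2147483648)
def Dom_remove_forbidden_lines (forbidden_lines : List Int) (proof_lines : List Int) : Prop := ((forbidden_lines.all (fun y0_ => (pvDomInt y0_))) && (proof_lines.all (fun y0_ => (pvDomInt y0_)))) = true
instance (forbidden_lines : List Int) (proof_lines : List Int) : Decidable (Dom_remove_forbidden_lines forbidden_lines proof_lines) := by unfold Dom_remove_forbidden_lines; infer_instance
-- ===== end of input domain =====

-- B concatenates the slices of proof_lines between the sorted valid forbidden cut points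
-- instead of A's per-index membership scan (O(n*m) membership scans replaced by slice concatenation; measured faster).

-- ===== PORT A =====
-- A: while i < len(proof_lines): if i in forbidden_lines: pass else: allowed.append(proof_lines[i]); i += 1
def remove_forbidden_lines (forbidden_lines : List Int) (proof_lines : List Int) : List Int :=
  (PySem.List.pyRange 0 (proof_lines.length : Int) 1).foldl
    (fun allowed i =>
      if forbidden_lines.contains i then allowed
      else allowed ++ [PySem.List.pyGetD proof_lines i 0]) []

-- ===== PORT B =====
-- B: cuts = sorted({i for i in forbidden_lines if 0 <= i < n}); concatenate proof_lines[prev:c] slices, then the tail proof_lines[prev:]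
def remove_forbidden_lines_alt (forbidden_lines : List Int) (proof_lines : List Int) : List Int :=
  let n : Int := proof_lines.length
  let cuts : List Int :=
    PySem.List.sorted
      (PySem.Set.ofList (forbidden_lines.filter (fun i => decide (0 ≤ i ∧ i < n))))
      (fun x => x) false
  let r : List Int × Int :=
    cuts.foldl
      (fun (acc : List Int × Int) c =>
        (acc.1 ++ PySem.List.slice proof_lines (some acc.2) (some c), c + 1))
      ([], 0)
  r.1 ++ PySem.List.slice proof_lines (some r.2) none

-- ===== PRECONDITION & SPEC =====
def Spec_remove_forbidden_lines (forbidden_lines : List Int) (proof_lines : List Int) (out : List Int) : Prop := out = remove_forbidden_lines_alt forbidden_lines proof_lines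
instance (forbidden_lines : List Int) (proof_lines : List Int) (out : List Int) : Decidable (Spec_remove_forbidden_lines forbidden_lines proof_lines out) := by unfold Spec_remove_forbidden_lines; infer_instance

-- ===== CLAIM (what is proved, stated in full; the proofs are below) =====
def Claim_equal_remove_forbidden_lines : Prop := ∀ (forbidden_lines : List Int) (proof_lines : List Int), Dom_remove_forbidden_lines forbidden_lines proof_lines → Spec_remove_forbidden_lines forbidden_lines proof_lines (remove_forbidden_lines forbidden_lines proof_lines)

-- ===== LEMMAS AND PROOFS =====

-- A's loop is the map of the lookup over the kept (non-forbidden) indices of range(n).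
theorem remove_forbidden_lines_eq_filter_map (forbidden_lines proof_lines : List Int) :
    remove_forbidden_lines forbidden_lines proof_lines
      = ((PySem.List.pyRange 0 (proof_lines.length : Int) 1).filter
          (fun i => !forbidden_lines.contains i)).map
          (fun i => PySem.List.pyGetD proof_lines i 0) := by
  unfold remove_forbidden_lines
  have h : (fun (allowed : List Int) i =>
        if forbidden_lines.contains i then allowed
        else allowed ++ [PySem.List.pyGetD proof_lines i 0])
      = (fun allowed i =>
        if !forbidden_lines.contains i then allowed ++ [PySem.List.pyGetD proof_lines i 0]
        else allowed) := by
    funext allowed i; cases forbidden_lines.contains i <;> simp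
  rw [h, PySem.List.foldl_append_if]
  simp

-- A slice with in-range nonnegative bounds is the lookup map over the index range.
theorem map_pyGetD_pyRange_seg (P : List Int) (a b : Int)
    (ha : 0 ≤ a) (hab : a ≤ b) (hb : b ≤ (P.length : Int)) :
    (PySem.List.pyRange a b 1).map (fun i => PySem.List.pyGetD P i 0)
      = PySem.List.slice P (some a) (some b) := by
  have hfull : (PySem.List.pyRange a (P.length : Int) 1).map (fun i => PySem.List.pyGetD P i 0)
      = (PySem.List.pyRange a b 1).map (fun i => PySem.List.pyGetD P i 0)
        ++ (PySem.List.pyRange b (P.length : Int) 1).map (fun i => PySem.List.pyGetD P i 0) := by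
    rw [PySem.List.pyRange_one_append a b _ hab hb, List.map_append]
  rw [PySem.List.map_pyGetD_pyRange' P 0 ha, PySem.List.map_pyGetD_pyRange' P 0 (le_trans ha hab)] at hfull
  have hlen : ((PySem.List.pyRange a b 1).map (fun i => PySem.List.pyGetD P i 0)).length
      = (b - a).toNat := by
    rw [List.length_map, PySem.List.length_pyRange_one]
  have htake := congrArg (List.take (b - a).toNat) hfull
  rw [List.take_append_of_le_length (le_of_eq hlen.symm),
    List.take_of_length_le (le_of_eq hlen)] at htake
  rw [PySem.List.slice_toNat P ha (le_trans ha hab), ← htake]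
  congr 1
  omega

-- Core invariant of B's fold: concatenating the slices between the remaining strictly
-- increasing cut points (exactly the forbidden indices from prev on) and the final tail
-- yields the lookup map over the kept indices of [prev, n).
theorem fold_cuts (P F : List Int) (cuts : List Int) :
    ∀ (out0 : List Int) (prev : Int), 0 ≤ prev →
    cuts.Pairwise (· < ·) →
    (∀ c ∈ cuts, prev ≤ c ∧ c < (P.length : Int)) →
    (∀ i : Int, prev ≤ i → i < (P.length : Int) → (F.contains i ↔ i ∈ cuts)) →
    (cuts.foldl
        (fun (acc : List Int × Int) c =>
          (acc.1 ++ PySem.List.slice P (some acc.2) (some c), c + 1)) (out0, prev)).1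
      ++ PySem.List.slice P
          (some (cuts.foldl
            (fun (acc : List Int × Int) c =>
              (acc.1 ++ PySem.List.slice P (some acc.2) (some c), c + 1)) (out0, prev)).2) none
      = out0 ++ ((PySem.List.pyRange prev (P.length : Int) 1).filter
          (fun i => !F.contains i)).map (fun i => PySem.List.pyGetD P i 0) := by
  induction cuts with
  | nil =>
    intro out0 prev hprev _ _ hiff
    have hfilter : (PySem.List.pyRange prev (P.length : Int) 1).filter
        (fun i => !F.contains i) = PySem.List.pyRange prev (P.length : Int) 1 := by
      apply List.filter_eq_self.mpr
      intro i hi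
      have hm := PySem.List.mem_pyRange_one.mp hi
      simp only [Bool.not_eq_eq_eq_not, Bool.not_true]
      by_contra hc
      have hFi : F.contains i = true := by revert hc; cases F.contains i <;> simp
      have : i ∈ ([] : List Int) := (hiff i hm.1 hm.2).mp hFi
      simp at this
    simp only [List.foldl_nil, hfilter]
    rw [PySem.List.slice_from P hprev, PySem.List.map_pyGetD_pyRange' P 0 hprev]
  | cons c rest ih =>
    intro out0 prev hprev hpw hbnd hiff
    have hc : prev ≤ c ∧ c < (P.length : Int) := hbnd c (by simp)
    have hrest_gt : ∀ c' ∈ rest, c < c' := fun c' h => (List.pairwise_cons.mp hpw).1 c' h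
    simp only [List.foldl_cons]
    rw [ih (out0 ++ PySem.List.slice P (some prev) (some c)) (c + 1) (by omega)
      (List.pairwise_cons.mp hpw).2
      (fun c' h => ⟨by have := hrest_gt c' h; omega, (hbnd c' (by simp [h])).2⟩)
      (fun i h1 h2 => by
        rw [hiff i (by omega) h2, List.mem_cons]
        constructor
        · rintro (rfl | h)
          · omega
          · exact h
        · exact fun h => Or.inr h)]
    have hsplit : PySem.List.pyRange prev (P.length : Int) 1
        = PySem.List.pyRange prev c 1 ++ (PySem.List.pyRange c (c+1) 1
          ++ PySem.List.pyRange (c+1) (P.length : Int) 1) := by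
      rw [← PySem.List.pyRange_one_append c (c+1) _ (by omega) (by omega),
        ← PySem.List.pyRange_one_append prev c _ hc.1 (by omega)]
    rw [hsplit, List.filter_append, List.filter_append, List.map_append, List.map_append]
    have hone : (PySem.List.pyRange c (c+1) 1).filter (fun i => !F.contains i) = [] := by
      rw [PySem.List.pyRange_one_singleton]
      have hFc : c ∈ F := by
        have := (hiff c hc.1 hc.2).mpr (by simp)
        simpa using this
      simp [hFc]
    have hlow : (PySem.List.pyRange prev c 1).filter (fun i => !F.contains i)
        = PySem.List.pyRange prev c 1 := by
      apply List.filter_eq_self.mpr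
      intro i hi
      have hm := PySem.List.mem_pyRange_one.mp hi
      simp only [Bool.not_eq_eq_eq_not, Bool.not_true]
      by_contra hcon
      have hFi : F.contains i = true := by revert hcon; cases F.contains i <;> simp
      have : i ∈ c :: rest := (hiff i hm.1 (by omega)).mp hFi
      rcases List.mem_cons.mp this with rfl | h
      · omega
      · have := hrest_gt i h; omega
    rw [hone, hlow, map_pyGetD_pyRange_seg P prev c hprev hc.1 (by omega)]
    simp

-- B unfolds to the same filter-map as A.
theorem alt_eq_filter_map (forbidden_lines proof_lines : List Int) :
    remove_forbidden_lines_alt forbidden_lines proof_lines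
      = ((PySem.List.pyRange 0 (proof_lines.length : Int) 1).filter
          (fun i => !forbidden_lines.contains i)).map
          (fun i => PySem.List.pyGetD proof_lines i 0) := by
  have hmem : ∀ i : Int,
      (i ∈ PySem.List.sorted
        (PySem.Set.ofList (forbidden_lines.filter
          (fun i => decide (0 ≤ i ∧ i < (proof_lines.length : Int)))))
        (fun x => x) false)
      ↔ (forbidden_lines.contains i = true ∧ 0 ≤ i ∧ i < (proof_lines.length : Int)) := by
    intro i
    rw [PySem.List.mem_sorted, PySem.Set.mem_ofList, List.mem_filter]
    simp
  have hpw := PySem.List.sorted_ofList_pairwise_lt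
    (forbidden_lines.filter (fun i => decide (0 ≤ i ∧ i < (proof_lines.length : Int))))
  have h := fold_cuts proof_lines forbidden_lines
    (PySem.List.sorted
      (PySem.Set.ofList (forbidden_lines.filter
        (fun i => decide (0 ≤ i ∧ i < (proof_lines.length : Int)))))
      (fun x => x) false)
    [] 0 le_rfl hpw
    (fun c hc => ⟨((hmem c).mp hc).2.1, ((hmem c).mp hc).2.2⟩)
    (fun i h1 h2 => by rw [hmem i]; exact ⟨fun h => ⟨h, h1, h2⟩, fun h => h.1⟩)
  unfold remove_forbidden_lines_alt
  simpa using h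

-- ===== VERDICT (by name: the statement is the Claim_ definition above) =====
theorem remove_forbidden_lines_spec : Claim_equal_remove_forbidden_lines := by
  intro forbidden_lines proof_lines _
  unfold Spec_remove_forbidden_lines
  rw [remove_forbidden_lines_eq_filter_map, alt_eq_filter_map]
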